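-- pv_equiv track=rewrite | github.com/vibhor-77/agi-mvp-general | arc_agent/object_decompose.py | _has_hole
-- ===== SOURCE A (Python) =====
-- def _has_hole(shape: dict) -> bool:
--     """Check if a shape has an enclosed hole (background pixel surrounded by shape pixels).
--
--     Uses flood fill from the border of the subgrid's bounding box to find
--     all reachable background cells. Any unreachable background cell is a hole.
--     """
--     subgrid = shape["subgrid"]
--     h = len(subgrid)
--     w = len(subgrid[0]) if h > 0 else 0
--     if h <= 2 or w <= 2:
--         return False  # Too small to have an interior hole
--
--     # Find background cells (value 0 or the object's own bg)
--     # In the subgrid, foreground pixels have the shape's color, bg is 0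
--     visited = [[False] * w for _ in range(h)]
--
--     # BFS from all border background cells
--     queue = []
--     for r in range(h):
--         for c in range(w):
--             if (r == 0 or r == h - 1 or c == 0 or c == w - 1):
--                 if subgrid[r][c] == 0:
--                     visited[r][c] = True
--                     queue.append((r, c))
--
--     while queue:
--         r, c = queue.pop()
--         for dr, dc in [(-1, 0), (1, 0), (0, -1), (0, 1)]:
--             nr, nc = r + dr, c + dc
--             if 0 <= nr < h and 0 <= nc < w and not visited[nr][nc]:
--                 if subgrid[nr][nc] == 0:
--                     visited[nr][nc] = True
--                     queue.append((nr, nc))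
--
--     # Any unvisited background cell is an interior hole
--     for r in range(h):
--         for c in range(w):
--             if subgrid[r][c] == 0 and not visited[r][c]:
--                 return True
--     return False
-- ===== SOURCE B (Python) =====
-- def _has_hole(shape: dict) -> bool:
--     """Round-based set saturation instead of an explicit flood-fill stack:
--     split zero cells into border-connected seeds and interior candidates,
--     then repeatedly absorb candidates adjacent to the reached set; a hole
--     exists iff some candidate is never absorbed."""
--     sub = shape["subgrid"]
--     h = len(sub)
--     w = len(sub[0]) if h > 0 else 0
--     if h <= 2 or w <= 2:
--         return False
--     reach = set()
--     todo = []
--     for r in range(h):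
--         for c in range(w):
--             if sub[r][c] == 0:
--                 if r == 0 or r == h - 1 or c == 0 or c == w - 1:
--                     reach.add((r, c))
--                 else:
--                     todo.append((r, c))
--     while True:
--         added = [(r, c) for (r, c) in todo
--                  if (r - 1, c) in reach or (r + 1, c) in reach
--                  or (r, c - 1) in reach or (r, c + 1) in reach]
--         if not added:
--             return bool(todo)
--         reach.update(added)
--         todo = [p for p in todo if p not in reach]
-- ===== Notes on version B (the rewrite author's own statement) =====
-- stated objective: alternative
-- what changed: Replaces the stack-based flood fill with a visited matrix by a round-based set saturation: zero cells are split once into border seeds and interior candidates, and candidates adjacent to the reached set are absorbed round by round until a fixpoint; a hole exists iff a candidate remains.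
import Mathlib
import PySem

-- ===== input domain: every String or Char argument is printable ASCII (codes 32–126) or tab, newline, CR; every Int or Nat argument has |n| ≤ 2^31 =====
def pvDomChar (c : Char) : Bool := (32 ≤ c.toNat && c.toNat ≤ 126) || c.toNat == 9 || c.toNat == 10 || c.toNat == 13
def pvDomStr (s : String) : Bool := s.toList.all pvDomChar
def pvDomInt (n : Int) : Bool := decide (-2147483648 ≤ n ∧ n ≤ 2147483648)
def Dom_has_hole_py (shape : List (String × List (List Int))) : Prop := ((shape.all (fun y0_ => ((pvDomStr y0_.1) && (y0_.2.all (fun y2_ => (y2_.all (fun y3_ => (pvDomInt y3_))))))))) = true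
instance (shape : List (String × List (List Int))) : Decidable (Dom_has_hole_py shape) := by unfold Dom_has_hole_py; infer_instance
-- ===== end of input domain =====

-- B replaces A's stack-based flood fill (visited matrix + LIFO queue) by a round-based
-- set saturation over the zero cells; equal return value on all inputs where A returns.

-- shared grid-access helpers (both Pythons index the grid and test the border the same way)
-- subgrid[r][c] == 0 (pyGet? none, i.e. an index Python would raise on, counts as "not zero";
-- Pre_ keeps such inputs out)
def zeroAt (g : List (List Int)) (r c : Int) : Bool :=
  match PySem.List.pyGet? g r with
  | some row => PySem.List.pyGet? row c == some 0
  | none => false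

def isBorder (h w : Int) (p : Int × Int) : Bool :=
  p.1 == 0 || p.1 == h - 1 || p.2 == 0 || p.2 == w - 1

-- the row-major list of all coordinates (r, c), 0 ≤ r < h, 0 ≤ c < w
def cellsOf (h w : Int) : List (Int × Int) :=
  (PySem.List.pyRange 0 h 1).flatMap (fun r => (PySem.List.pyRange 0 w 1).map (fun c => (r, c)))

-- ===== PORT A =====
def pvDirs : List (Int × Int) := [(-1, 0), (1, 0), (0, -1), (0, 1)]

-- one iteration of A's inner `for dr, dc in …` body; the visited matrix is represented by
-- its complement `st.1` (`fresh`): visited[r][c] = True ↔ (r,c) ∉ fresh (exact)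
def stepDir (g : List (List Int)) (h w : Int) (p : Int × Int)
    (st : List (Int × Int) × List (Int × Int)) (d : Int × Int) :
    List (Int × Int) × List (Int × Int) :=
  if (p.1 + d.1, p.2 + d.2) ∈ st.1 ∧ 0 ≤ p.1 + d.1 ∧ p.1 + d.1 < h ∧ 0 ≤ p.2 + d.2 ∧ p.2 + d.2 < w then
    if zeroAt g (p.1 + d.1) (p.2 + d.2) then
      (st.1.erase (p.1 + d.1, p.2 + d.2), (p.1 + d.1, p.2 + d.2) :: st.2)
    else st
  else st

theorem stepDir_mu (g : List (List Int)) (h w : Int) (p : Int × Int)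
    (st : List (Int × Int) × List (Int × Int)) (d : Int × Int) :
    2 * (stepDir g h w p st d).1.length + (stepDir g h w p st d).2.length ≤
      2 * st.1.length + st.2.length := by
  unfold stepDir
  split_ifs with h1 h2
  · have hm : (p.1 + d.1, p.2 + d.2) ∈ st.1 := h1.1
    have := List.length_erase_of_mem hm
    simp only [this]
    have : 1 ≤ st.1.length := List.length_pos_of_mem hm
    simp only [List.length_cons]
    omega
  · exact le_refl _
  · exact le_refl _

theorem foldl_stepDir_mu (g : List (List Int)) (h w : Int) (p : Int × Int)
    (ds : List (Int × Int)) (st : List (Int × Int) × List (Int × Int)) :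
    2 * (ds.foldl (stepDir g h w p) st).1.length + (ds.foldl (stepDir g h w p) st).2.length ≤
      2 * st.1.length + st.2.length := by
  induction ds generalizing st with
  | nil => exact le_refl _
  | cons d ds ih =>
    simp only [List.foldl_cons]
    exact le_trans (ih _) (stepDir_mu g h w p st d)

-- A's `while queue:` loop; `fresh` is the complement of visited, the stack's head is its top
def dfsLoop (g : List (List Int)) (h w : Int)
    (fresh stack : List (Int × Int)) : List (Int × Int) :=
  match stack with
  | [] => fresh
  | p :: rest =>
    dfsLoop g h w (pvDirs.foldl (stepDir g h w p) (fresh, rest)).1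
      (pvDirs.foldl (stepDir g h w p) (fresh, rest)).2
termination_by 2 * fresh.length + stack.length
decreasing_by
  have := foldl_stepDir_mu g h w p pvDirs (fresh, rest)
  simp only [List.length_cons] at *
  omega

def has_hole_py (shape : List (String × List (List Int))) : Bool :=
  match (PySem.Dict.mk shape).get? "subgrid" with
  | none => false  -- Python raises KeyError here; excluded by Pre_
  | some g =>
    let h : Int := g.length
    let w : Int := if 0 < h then ((g.headD []).length : Int) else 0
    if h ≤ 2 ∨ w ≤ 2 then false
    else
      -- border scan: mark (remove from fresh) and push every border zero, row-major;
      -- the stack is kept head-as-top, so the row-major pushes are reversed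
      let seed := (cellsOf h w).filter (fun p => isBorder h w p && zeroAt g p.1 p.2)
      let fresh0 := (cellsOf h w).filter (fun p => !(isBorder h w p && zeroAt g p.1 p.2))
      let freshF := dfsLoop g h w fresh0 seed.reverse
      -- final scan: any zero cell still unvisited (still in fresh)
      (cellsOf h w).any (fun p => zeroAt g p.1 p.2 && decide (p ∈ freshF))

-- ===== PORT B =====
def nbrs (p : Int × Int) : List (Int × Int) :=
  [(p.1 - 1, p.2), (p.1 + 1, p.2), (p.1, p.2 - 1), (p.1, p.2 + 1)]

-- B's `while True:` saturation loop: absorb every candidate adjacent to the reached set,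
-- stop at the first round that absorbs nothing; hole ⟺ a candidate is left over
def satLoop (reach todo : List (Int × Int)) : Bool :=
  if (todo.filter (fun p => (nbrs p).any (fun q => decide (q ∈ reach)))).isEmpty then
    !todo.isEmpty
  else
    satLoop (reach ++ todo.filter (fun p => (nbrs p).any (fun q => decide (q ∈ reach))))
      (todo.filter (fun p =>
        decide (p ∉ reach ++ todo.filter (fun p => (nbrs p).any (fun q => decide (q ∈ reach))))))
termination_by todo.length
decreasing_by
  rename_i hne
  rw [List.isEmpty_iff] at hne
  have h1 : List.filter
      (fun x : {x : Int × Int // x ∈ todo} =>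
        match x with | ⟨p, _⟩ => (nbrs p).any fun q => decide (q ∈ reach))
      todo.attach ≠ [] := by
    intro h; exact hne (by rw [h]; rfl)
  obtain ⟨a, ha⟩ := List.exists_mem_of_ne_nil _ h1
  have hmem : (a : Int × Int) ∈
      (List.filter
        (fun x : {x : Int × Int // x ∈ todo} =>
          match x with | ⟨p, _⟩ => (nbrs p).any fun q => decide (q ∈ reach))
        todo.attach).unattach := by
    simp only [List.unattach, List.mem_map]
    exact ⟨a, ha, rfl⟩
  have hlt : (List.filter
      (fun x : {x : Int × Int // x ∈ todo} =>
        decide ((x : Int × Int) ∉ reach ++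
          (List.filter (fun x : {x : Int × Int // x ∈ todo} => (nbrs ↑x).any fun q => decide (q ∈ reach))
            todo.attach).unattach))
      todo.attach).length < todo.attach.length :=
    List.length_filter_lt_length_iff_exists.mpr
      ⟨a, List.mem_of_mem_filter ha, by
        intro hcon
        simp only [decide_eq_true_eq] at hcon
        exact hcon (List.mem_append_right _ hmem)⟩
  simpa using hlt

def has_hole_py_alt (shape : List (String × List (List Int))) : Bool :=
  match (PySem.Dict.mk shape).get? "subgrid" with
  | none => false  -- Python raises KeyError here; excluded by Pre_
  | some g =>
    let h : Int := g.length
    let w : Int := if 0 < h then ((g.headD []).length : Int) else 0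
    if h ≤ 2 ∨ w ≤ 2 then false
    else
      satLoop ((cellsOf h w).filter (fun p => zeroAt g p.1 p.2 && isBorder h w p))
              ((cellsOf h w).filter (fun p => zeroAt g p.1 p.2 && !isBorder h w p))

-- ===== PRECONDITION & SPEC =====
-- Pre_ excludes exactly the inputs on which the Python A raises: a missing "subgrid" key
-- (KeyError), and — when the grid is larger than 2×2 — a row shorter than row 0 (IndexError).
def Pre_has_hole_py (shape : List (String × List (List Int))) : Prop :=
  ((PySem.Dict.mk shape).get? "subgrid").isSome = true ∧
  ((((PySem.Dict.mk shape).get? "subgrid").getD []).length ≤ 2 ∨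
   ((((PySem.Dict.mk shape).get? "subgrid").getD []).headD []).length ≤ 2 ∨
   ∀ row ∈ (((PySem.Dict.mk shape).get? "subgrid").getD []),
     ((((PySem.Dict.mk shape).get? "subgrid").getD []).headD []).length ≤ row.length)
instance (shape : List (String × List (List Int))) : Decidable (Pre_has_hole_py shape) := by
  unfold Pre_has_hole_py; infer_instance

def pvWitness_has_hole_py : (List (String × List (List Int))) :=
  [("subgrid", [[1, 1, 1], [1, 0, 1], [1, 1, 1]])]

def Spec_has_hole_py (shape : List (String × List (List Int))) (out : Bool) : Prop := out = has_hole_py_alt shape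
instance (shape : List (String × List (List Int))) (out : Bool) : Decidable (Spec_has_hole_py shape out) := by unfold Spec_has_hole_py; infer_instance

-- ===== CLAIM (what is proved, stated in full; the proofs are below) =====
def Claim_equal_has_hole_py : Prop := ∀ (shape : List (String × List (List Int))), Dom_has_hole_py shape → Pre_has_hole_py shape → Spec_has_hole_py shape (has_hole_py shape)

-- ===== LEMMAS AND PROOFS =====


-- (r, c) lies inside the h × w grid
def InG (h w : Int) (p : Int × Int) : Prop :=
  0 ≤ p.1 ∧ p.1 < h ∧ 0 ≤ p.2 ∧ p.2 < w

theorem mem_cellsOf (h w : Int) (p : Int × Int) : p ∈ cellsOf h w ↔ InG h w p := by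
  rcases p with ⟨r, c⟩
  simp only [cellsOf, List.mem_flatMap, List.mem_map, PySem.List.mem_pyRange_one, InG,
    Prod.mk.injEq]
  constructor
  · rintro ⟨a, ⟨h1, h2⟩, b, ⟨h3, h4⟩, rfl, rfl⟩
    exact ⟨h1, h2, h3, h4⟩
  · rintro ⟨h1, h2, h3, h4⟩
    exact ⟨r, ⟨h1, h2⟩, c, ⟨h3, h4⟩, rfl, rfl⟩

theorem nodup_cellsOf (h w : Int) : (cellsOf h w).Nodup := by
  have he : cellsOf h w = (PySem.List.pyRange 0 h 1) ×ˢ (PySem.List.pyRange 0 w 1) := rfl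
  rw [he]
  exact List.Nodup.product (PySem.List.nodup_pyRange_one 0 h) (PySem.List.nodup_pyRange_one 0 w)

theorem nbrs_symm {p q : Int × Int} (hq : q ∈ nbrs p) : p ∈ nbrs q := by
  rcases p with ⟨a, b⟩; rcases q with ⟨c, d⟩
  simp only [nbrs, List.mem_cons, List.not_mem_nil, or_false, Prod.mk.injEq] at hq ⊢
  omega

-- one zero-cell step of the flood fill, seen as a relation
def StepR (g : List (List Int)) (h w : Int) (a b : Int × Int) : Prop :=
  InG h w b ∧ zeroAt g b.1 b.2 = true ∧ b ∈ nbrs a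

-- x is a zero cell connected (through zero cells) to some border zero cell
def Conn (g : List (List Int)) (h w : Int) (x : Int × Int) : Prop :=
  ∃ s, InG h w s ∧ isBorder h w s = true ∧ zeroAt g s.1 s.2 = true ∧
    Relation.ReflTransGen (StepR g h w) s x

theorem conn_step {g : List (List Int)} {h w : Int} {a b : Int × Int}
    (hc : Conn g h w a) (hs : StepR g h w a b) : Conn g h w b := by
  obtain ⟨s, h1, h2, h3, h4⟩ := hc
  exact ⟨s, h1, h2, h3, h4.tail hs⟩

theorem conn_base {g : List (List Int)} {h w : Int} {x : Int × Int}
    (h1 : InG h w x) (h2 : isBorder h w x = true) (h3 : zeroAt g x.1 x.2 = true) :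
    Conn g h w x := ⟨x, h1, h2, h3, Relation.ReflTransGen.refl⟩

theorem mem_nbrs_exists {p q : Int × Int} (hq : q ∈ nbrs p) :
    ∃ d ∈ pvDirs, q = (p.1 + d.1, p.2 + d.2) := by
  simp only [nbrs, List.mem_cons, List.not_mem_nil, or_false] at hq
  rcases hq with rfl | rfl | rfl | rfl
  · exact ⟨(-1, 0), by simp [pvDirs], by simp; try ring⟩
  · exact ⟨(1, 0), by simp [pvDirs], by simp; try ring⟩
  · exact ⟨(0, -1), by simp [pvDirs], by simp; try ring⟩
  · exact ⟨(0, 1), by simp [pvDirs], by simp; try ring⟩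

theorem dirs_mem_nbrs {p : Int × Int} {d : Int × Int} (hd : d ∈ pvDirs) :
    (p.1 + d.1, p.2 + d.2) ∈ nbrs p := by
  simp only [pvDirs, List.mem_cons, List.not_mem_nil, or_false] at hd
  rcases hd with rfl | rfl | rfl | rfl <;>
    simp [nbrs, Prod.ext_iff] <;> omega

-- invariant of A's DFS state: distinct fresh cells, every non-fresh grid cell is a
-- connected zero cell, every stacked cell is a non-fresh grid cell
def StInv (g : List (List Int)) (h w : Int)
    (st : List (Int × Int) × List (Int × Int)) : Prop :=
  st.1.Nodup ∧
  (∀ x ∈ cellsOf h w, x ∉ st.1 → zeroAt g x.1 x.2 = true ∧ Conn g h w x) ∧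
  (∀ x ∈ st.2, x ∈ cellsOf h w ∧ x ∉ st.1)

theorem stepDir_spec (g : List (List Int)) (h w : Int) (p : Int × Int)
    (st : List (Int × Int) × List (Int × Int)) (d : Int × Int)
    (hd : (p.1 + d.1, p.2 + d.2) ∈ nbrs p)
    (hp : Conn g h w p) (hInv : StInv g h w st) :
    StInv g h w (stepDir g h w p st d) ∧
    (∀ x, x ∈ (stepDir g h w p st d).1 → x ∈ st.1) ∧
    (∀ x, x ∈ st.2 → x ∈ (stepDir g h w p st d).2) ∧
    (∀ x, x ∈ st.1 → x ∉ (stepDir g h w p st d).1 → x ∈ (stepDir g h w p st d).2) ∧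
    (InG h w (p.1 + d.1, p.2 + d.2) → zeroAt g (p.1 + d.1) (p.2 + d.2) = true →
      (p.1 + d.1, p.2 + d.2) ∉ (stepDir g h w p st d).1) := by
  obtain ⟨hN, hI1, hI2⟩ := hInv
  unfold stepDir
  split_ifs with hc hz
  · -- the neighbour is fresh, in bounds and zero: mark it and push it
    have hmem : (p.1 + d.1, p.2 + d.2) ∈ st.1 := hc.1
    have hInG : InG h w (p.1 + d.1, p.2 + d.2) := ⟨hc.2.1, hc.2.2.1, hc.2.2.2.1, hc.2.2.2.2⟩
    have hcell : (p.1 + d.1, p.2 + d.2) ∈ cellsOf h w := (mem_cellsOf h w _).mpr hInG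
    have hconn : Conn g h w (p.1 + d.1, p.2 + d.2) := conn_step hp ⟨hInG, hz, hd⟩
    have hnotmem : (p.1 + d.1, p.2 + d.2) ∉ st.1.erase (p.1 + d.1, p.2 + d.2) :=
      hN.not_mem_erase
    refine ⟨⟨hN.erase _, ?_, ?_⟩, ?_, ?_, ?_, fun _ _ => hnotmem⟩
    · intro x hx hxe
      by_cases hxn : x = (p.1 + d.1, p.2 + d.2)
      · subst hxn; exact ⟨hz, hconn⟩
      · exact hI1 x hx (fun hx1 => hxe ((List.mem_erase_of_ne hxn).mpr hx1))
    · intro x hx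
      rcases List.mem_cons.mp hx with rfl | hx2
      · exact ⟨hcell, hnotmem⟩
      · obtain ⟨ha, hb⟩ := hI2 x hx2
        exact ⟨ha, fun hx1 => hb (List.mem_of_mem_erase hx1)⟩
    · exact fun x hx => List.mem_of_mem_erase hx
    · exact fun x hx => List.mem_cons_of_mem _ hx
    · intro x hx1 hx2
      by_cases hxn : x = (p.1 + d.1, p.2 + d.2)
      · subst hxn; exact List.mem_cons_self
      · exact absurd ((List.mem_erase_of_ne hxn).mpr hx1) hx2
  · -- in bounds and fresh but not zero: nothing changes
    refine ⟨⟨hN, hI1, hI2⟩, fun x hx => hx, fun x hx => hx, fun x hx1 hx2 => absurd hx1 hx2,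
      fun _ hzero => absurd hzero (by simp [hz])⟩
  · -- out of bounds or already visited: nothing changes
    refine ⟨⟨hN, hI1, hI2⟩, fun x hx => hx, fun x hx => hx, fun x hx1 hx2 => absurd hx1 hx2,
      ?_⟩
    intro hInG _ hmem
    exact hc ⟨hmem, hInG.1, hInG.2.1, hInG.2.2.1, hInG.2.2.2⟩

theorem foldl_dirs_spec (g : List (List Int)) (h w : Int) (p : Int × Int)
    (ds : List (Int × Int)) (hds : ∀ d ∈ ds, (p.1 + d.1, p.2 + d.2) ∈ nbrs p)
    (hp : Conn g h w p) :
    ∀ st, StInv g h w st →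
    StInv g h w (ds.foldl (stepDir g h w p) st) ∧
    (∀ x, x ∈ (ds.foldl (stepDir g h w p) st).1 → x ∈ st.1) ∧
    (∀ x, x ∈ st.2 → x ∈ (ds.foldl (stepDir g h w p) st).2) ∧
    (∀ x, x ∈ st.1 → x ∉ (ds.foldl (stepDir g h w p) st).1 →
      x ∈ (ds.foldl (stepDir g h w p) st).2) ∧
    (∀ d ∈ ds, InG h w (p.1 + d.1, p.2 + d.2) → zeroAt g (p.1 + d.1) (p.2 + d.2) = true →
      (p.1 + d.1, p.2 + d.2) ∉ (ds.foldl (stepDir g h w p) st).1) := by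
  induction ds with
  | nil =>
    intro st hInv
    exact ⟨hInv, fun x hx => hx, fun x hx => hx, fun x hx1 hx2 => absurd hx1 hx2,
      by simp⟩
  | cons d ds ih =>
    intro st hInv
    obtain ⟨hInv1, hMono1, hSt1, hRem1, hHand1⟩ :=
      stepDir_spec g h w p st d (hds d List.mem_cons_self) hp hInv
    obtain ⟨hInv2, hMono2, hSt2, hRem2, hHand2⟩ :=
      ih (fun e he => hds e (List.mem_cons_of_mem _ he)) _ hInv1
    simp only [List.foldl_cons]
    refine ⟨hInv2, fun x hx => hMono1 x (hMono2 x hx), fun x hx => hSt2 x (hSt1 x hx),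
      ?_, ?_⟩
    · intro x hx1 hx2
      by_cases hmid : x ∈ (stepDir g h w p st d).1
      · exact hRem2 x hmid hx2
      · exact hSt2 x (hRem1 x hx1 hmid)
    · intro e he hInG hz
      rcases List.mem_cons.mp he with rfl | he2
      · exact fun hx => hHand1 hInG hz (hMono2 _ hx)
      · exact hHand2 e he2 hInG hz

theorem dfsLoop_spec (g : List (List Int)) (h w : Int) :
    ∀ (N : Nat) (fresh stack : List (Int × Int)),
    2 * fresh.length + stack.length ≤ N →
    StInv g h w (fresh, stack) →
    (∀ x ∈ cellsOf h w, x ∉ fresh → x ∉ stack →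
      ∀ q ∈ nbrs x, InG h w q → zeroAt g q.1 q.2 = true → q ∉ fresh) →
    (∀ x, x ∈ dfsLoop g h w fresh stack → x ∈ fresh) ∧
    (∀ x ∈ cellsOf h w, x ∉ dfsLoop g h w fresh stack →
      zeroAt g x.1 x.2 = true ∧ Conn g h w x) ∧
    (∀ x ∈ cellsOf h w, x ∉ dfsLoop g h w fresh stack →
      ∀ q ∈ nbrs x, InG h w q → zeroAt g q.1 q.2 = true →
        q ∉ dfsLoop g h w fresh stack) := by
  intro N
  induction N with
  | zero =>
    intro fresh stack hμ hInv hI3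
    have hs : stack = [] := by
      cases stack with
      | nil => rfl
      | cons a t => simp [List.length_cons] at hμ
    subst hs
    rw [dfsLoop]
    exact ⟨fun x hx => hx, hInv.2.1, fun x hx1 hx2 q hq hInG hz => hI3 x hx1 hx2
      (List.not_mem_nil) q hq hInG hz⟩
  | succ n ih =>
    intro fresh stack hμ hInv hI3
    cases stack with
    | nil =>
      rw [dfsLoop]
      exact ⟨fun x hx => hx, hInv.2.1, fun x hx1 hx2 q hq hInG hz => hI3 x hx1 hx2
        (List.not_mem_nil) q hq hInG hz⟩
    | cons p rest =>
      have hpfacts := hInv.2.2 p List.mem_cons_self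
      have hpz := hInv.2.1 p hpfacts.1 hpfacts.2
      have hInv' : StInv g h w (fresh, rest) :=
        ⟨hInv.1, hInv.2.1, fun x hx => hInv.2.2 x (List.mem_cons_of_mem _ hx)⟩
      obtain ⟨hInvF, hMono, hStM, hRem, hHand⟩ :=
        foldl_dirs_spec g h w p pvDirs (fun d hd => dirs_mem_nbrs hd) hpz.2
          (fresh, rest) hInv'
      have hμ' : 2 * (pvDirs.foldl (stepDir g h w p) (fresh, rest)).1.length +
          (pvDirs.foldl (stepDir g h w p) (fresh, rest)).2.length ≤ n := by
        have h1 := foldl_stepDir_mu g h w p pvDirs (fresh, rest)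
        dsimp only at h1
        simp only [List.length_cons] at hμ
        omega
      have hI3' : ∀ x ∈ cellsOf h w, x ∉ (pvDirs.foldl (stepDir g h w p) (fresh, rest)).1 →
          x ∉ (pvDirs.foldl (stepDir g h w p) (fresh, rest)).2 →
          ∀ q ∈ nbrs x, InG h w q → zeroAt g q.1 q.2 = true →
            q ∉ (pvDirs.foldl (stepDir g h w p) (fresh, rest)).1 := by
        intro x hx hxf hxs q hq hInG hz
        by_cases hxfresh : x ∈ fresh
        · exact absurd (hRem x hxfresh hxf) hxs
        · by_cases hxp : x = p
          · subst hxp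
            obtain ⟨d, hd, rfl⟩ := mem_nbrs_exists hq
            exact hHand d hd hInG hz
          · by_cases hxrest : x ∈ rest
            · exact absurd (hStM x hxrest) hxs
            · intro hqmem
              exact hI3 x hx hxfresh (by simp [hxp, hxrest]) q hq hInG hz (hMono q hqmem)
      have hres := ih _ _ hμ' hInvF hI3'
      rw [dfsLoop]
      exact ⟨fun x hx => hMono x (hres.1 x hx), hres.2.1, hres.2.2⟩

theorem conn_notin_of (g : List (List Int)) (h w : Int) (F : List (Int × Int))
    (hseed : ∀ x, InG h w x → isBorder h w x = true → zeroAt g x.1 x.2 = true → x ∉ F)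
    (hclosed : ∀ x ∈ cellsOf h w, x ∉ F →
      ∀ q ∈ nbrs x, InG h w q → zeroAt g q.1 q.2 = true → q ∉ F) :
    ∀ x, Conn g h w x → x ∉ F := by
  intro x hc
  obtain ⟨s, h1, h2, h3, h4⟩ := hc
  have : x ∉ F ∧ InG h w x := by
    induction h4 with
    | refl => exact ⟨hseed s h1 h2 h3, h1⟩
    | tail hab hstep ihx =>
      rename_i b c
      refine ⟨hclosed b ((mem_cellsOf h w b).mpr ihx.2) ihx.1 c hstep.2.2 hstep.1
        hstep.2.1, hstep.1⟩
  exact this.1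

theorem satLoop_spec (g : List (List Int)) (h w : Int) :
    ∀ (N : Nat) (reach todo : List (Int × Int)),
    todo.length ≤ N →
    (∀ x ∈ reach, x ∈ cellsOf h w ∧ zeroAt g x.1 x.2 = true ∧ Conn g h w x) →
    (∀ x ∈ todo, x ∈ cellsOf h w ∧ zeroAt g x.1 x.2 = true ∧ x ∉ reach) →
    (∀ x ∈ cellsOf h w, zeroAt g x.1 x.2 = true → x ∈ reach ∨ x ∈ todo) →
    (∀ x ∈ cellsOf h w, isBorder h w x = true → zeroAt g x.1 x.2 = true → x ∈ reach) →
    (satLoop reach todo = true ↔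
      ∃ p ∈ cellsOf h w, zeroAt g p.1 p.2 = true ∧ ¬ Conn g h w p) := by
  intro N
  induction N with
  | zero =>
    intro reach todo hμ hJ1 hJ2 hJ3 hJ4
    have ht : todo = [] := List.length_eq_zero_iff.mp (Nat.le_zero.mp hμ)
    subst ht
    rw [satLoop]
    simp only [List.filter_nil, List.isEmpty_nil, if_true]
    constructor
    · intro hcon; simp at hcon
    · rintro ⟨p, hpc, hpz, hpnc⟩
      rcases hJ3 p hpc hpz with hr | ht
      · exact absurd (hJ1 p hr).2.2 hpnc
      · exact absurd ht List.not_mem_nil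
  | succ n ih =>
    intro reach todo hμ hJ1 hJ2 hJ3 hJ4
    rw [satLoop]
    by_cases hadd : (todo.filter (fun p => (nbrs p).any (fun q => decide (q ∈ reach)))).isEmpty
    · simp only [hadd, if_true]
      have hfil : ∀ a ∈ todo, ¬ ((nbrs a).any (fun q => decide (q ∈ reach)) = true) := by
        have := List.isEmpty_iff.mp hadd
        intro a ha hpred
        have : a ∈ todo.filter (fun p => (nbrs p).any (fun q => decide (q ∈ reach))) :=
          List.mem_filter.mpr ⟨ha, hpred⟩
        rw [List.isEmpty_iff.mp hadd] at this
        exact List.not_mem_nil this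
      have hconnreach : ∀ x, Conn g h w x → x ∈ reach := by
        intro x hc
        obtain ⟨s, h1, h2, h3, h4⟩ := hc
        clear hμ
        induction h4 with
        | refl => exact hJ4 s ((mem_cellsOf h w s).mpr h1) h2 h3
        | tail hab hstep ihr =>
          rename_i b c
          have hb : b ∈ reach := ihr
          have hcc : c ∈ cellsOf h w := (mem_cellsOf h w c).mpr hstep.1
          rcases hJ3 c hcc hstep.2.1 with hr | ht
          · exact hr
          · exfalso
            refine hfil c ht ?_
            exact List.any_eq_true.mpr ⟨b, nbrs_symm hstep.2.2, by simp [hb]⟩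
      constructor
      · intro hne
        rcases htd : todo with _ | ⟨q, t⟩
        · rw [htd] at hne; simp at hne
        · have hq : q ∈ todo := by rw [htd]; exact List.mem_cons_self
          obtain ⟨hqc, hqz, hqr⟩ := hJ2 q hq
          exact ⟨q, hqc, hqz, fun hcon => hqr (hconnreach q hcon)⟩
      · rintro ⟨p, hpc, hpz, hpnc⟩
        rcases hJ3 p hpc hpz with hr | ht
        · exact absurd (hJ1 p hr).2.2 hpnc
        · rcases htd : todo with _ | ⟨q, t⟩
          · rw [htd] at ht; exact absurd ht List.not_mem_nil
          · subst htd; simp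
    · simp only [hadd]
      -- one saturation round: absorb `added`, shrink `todo`
      obtain ⟨a, haf⟩ : ∃ a, a ∈ todo.filter
          (fun p => (nbrs p).any (fun q => decide (q ∈ reach))) := by
        rcases hl : todo.filter (fun p => (nbrs p).any (fun q => decide (q ∈ reach)))
          with _ | ⟨a, t⟩
        · rw [hl] at hadd; simp at hadd
        · exact ⟨a, by simp⟩
      have hlt : (todo.filter (fun p => decide (p ∉ reach ++ todo.filter
          (fun p => (nbrs p).any (fun q => decide (q ∈ reach)))))).length < todo.length := by
        refine List.length_filter_lt_length_iff_exists.mpr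
          ⟨a, List.mem_of_mem_filter haf, ?_⟩
        intro hcon
        simp only [decide_eq_true_eq] at hcon
        exact hcon (List.mem_append_right _ haf)
      have hμ' : (todo.filter (fun p => decide (p ∉ reach ++ todo.filter
          (fun p => (nbrs p).any (fun q => decide (q ∈ reach)))))).length ≤ n := by omega
      refine ih _ _ hμ' ?_ ?_ ?_ ?_
      · intro x hx
        rcases List.mem_append.mp hx with hr | hf
        · exact hJ1 x hr
        · have hxt := List.mem_of_mem_filter hf
          obtain ⟨hxc, hxz, _⟩ := hJ2 x hxt
          have hpred := List.of_mem_filter hf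
          obtain ⟨q, hq, hqr⟩ := List.any_eq_true.mp hpred
          simp only [decide_eq_true_eq] at hqr
          have hqconn := (hJ1 q hqr).2.2
          exact ⟨hxc, hxz, conn_step hqconn ⟨(mem_cellsOf h w x).mp hxc, hxz, nbrs_symm hq⟩⟩
      · intro x hx
        have hxt := List.mem_of_mem_filter hx
        obtain ⟨hxc, hxz, _⟩ := hJ2 x hxt
        have hpred := List.of_mem_filter hx
        simp only [decide_eq_true_eq] at hpred
        exact ⟨hxc, hxz, hpred⟩
      · intro x hxc hxz
        rcases hJ3 x hxc hxz with hr | ht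
        · exact Or.inl (List.mem_append_left _ hr)
        · by_cases hxin : x ∈ reach ++ todo.filter
            (fun p => (nbrs p).any (fun q => decide (q ∈ reach)))
          · exact Or.inl hxin
          · exact Or.inr (List.mem_filter.mpr ⟨ht, by simp [hxin]⟩)
      · intro x hxc hxb hxz
        exact List.mem_append_left _ (hJ4 x hxc hxb hxz)

-- the two loops, run from their initial states, decide the same proposition
theorem core_equal (g : List (List Int)) (h w : Int) :
    ((cellsOf h w).any (fun p => zeroAt g p.1 p.2 && decide (p ∈ dfsLoop g h w
        ((cellsOf h w).filter (fun p => !(isBorder h w p && zeroAt g p.1 p.2)))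
        (((cellsOf h w).filter (fun p => isBorder h w p && zeroAt g p.1 p.2)).reverse))))
    = satLoop ((cellsOf h w).filter (fun p => zeroAt g p.1 p.2 && isBorder h w p))
        ((cellsOf h w).filter (fun p => zeroAt g p.1 p.2 && !isBorder h w p)) := by
  have hfresh0 : ∀ x ∈ cellsOf h w,
      x ∉ (cellsOf h w).filter (fun p => !(isBorder h w p && zeroAt g p.1 p.2)) →
      isBorder h w x = true ∧ zeroAt g x.1 x.2 = true := by
    intro x hx hnf
    by_cases hbz : (isBorder h w x && zeroAt g x.1 x.2) = true
    · rw [Bool.and_eq_true] at hbz; exact hbz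
    · exact absurd (List.mem_filter.mpr ⟨hx, by simp [hbz]⟩) hnf
  have hInv : StInv g h w
      ((cellsOf h w).filter (fun p => !(isBorder h w p && zeroAt g p.1 p.2)),
       ((cellsOf h w).filter (fun p => isBorder h w p && zeroAt g p.1 p.2)).reverse) := by
    refine ⟨(nodup_cellsOf h w).filter _, ?_, ?_⟩
    · intro x hx hnf
      obtain ⟨hb, hz⟩ := hfresh0 x hx hnf
      exact ⟨hz, conn_base ((mem_cellsOf h w x).mp hx) hb hz⟩
    · intro x hx
      rw [List.mem_reverse] at hx
      obtain ⟨hxc, hpred⟩ := List.mem_filter.mp hx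
      refine ⟨hxc, fun hcon => ?_⟩
      have := (List.mem_filter.mp hcon).2
      simp [hpred] at this
  have hI3 : ∀ x ∈ cellsOf h w,
      x ∉ (cellsOf h w).filter (fun p => !(isBorder h w p && zeroAt g p.1 p.2)) →
      x ∉ ((cellsOf h w).filter (fun p => isBorder h w p && zeroAt g p.1 p.2)).reverse →
      ∀ q ∈ nbrs x, InG h w q → zeroAt g q.1 q.2 = true →
        q ∉ (cellsOf h w).filter (fun p => !(isBorder h w p && zeroAt g p.1 p.2)) := by
    intro x hx hnf hns
    exfalso
    obtain ⟨hb, hz⟩ := hfresh0 x hx hnf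
    exact hns (List.mem_reverse.mpr (List.mem_filter.mpr ⟨hx, by simp [hb, hz]⟩))
  obtain ⟨hC1, hC2, hC3⟩ := dfsLoop_spec g h w _ _ _ le_rfl hInv hI3
  have hseed : ∀ x, InG h w x → isBorder h w x = true → zeroAt g x.1 x.2 = true →
      x ∉ dfsLoop g h w
        ((cellsOf h w).filter (fun p => !(isBorder h w p && zeroAt g p.1 p.2)))
        (((cellsOf h w).filter (fun p => isBorder h w p && zeroAt g p.1 p.2)).reverse) := by
    intro x hInG hb hz hmem
    have := (List.mem_filter.mp (hC1 x hmem)).2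
    simp [hb, hz] at this
  have hcompl := conn_notin_of g h w _ hseed hC3
  have hA : ((cellsOf h w).any (fun p => zeroAt g p.1 p.2 && decide (p ∈ dfsLoop g h w
        ((cellsOf h w).filter (fun p => !(isBorder h w p && zeroAt g p.1 p.2)))
        (((cellsOf h w).filter (fun p => isBorder h w p && zeroAt g p.1 p.2)).reverse))) = true)
      ↔ ∃ p ∈ cellsOf h w, zeroAt g p.1 p.2 = true ∧ ¬ Conn g h w p := by
    rw [List.any_eq_true]
    constructor
    · rintro ⟨p, hp, hpred⟩
      rw [Bool.and_eq_true, decide_eq_true_eq] at hpred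
      exact ⟨p, hp, hpred.1, fun hcon => hcompl p hcon hpred.2⟩
    · rintro ⟨p, hp, hz, hnc⟩
      refine ⟨p, hp, ?_⟩
      rw [Bool.and_eq_true, decide_eq_true_eq]
      refine ⟨hz, ?_⟩
      by_contra hnm
      exact hnc (hC2 p hp hnm).2
  have hB : (satLoop ((cellsOf h w).filter (fun p => zeroAt g p.1 p.2 && isBorder h w p))
        ((cellsOf h w).filter (fun p => zeroAt g p.1 p.2 && !isBorder h w p)) = true)
      ↔ ∃ p ∈ cellsOf h w, zeroAt g p.1 p.2 = true ∧ ¬ Conn g h w p := by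
    refine satLoop_spec g h w _ _ _ le_rfl ?_ ?_ ?_ ?_
    · intro x hx
      obtain ⟨hxc, hpred⟩ := List.mem_filter.mp hx
      rw [Bool.and_eq_true] at hpred
      exact ⟨hxc, hpred.1, conn_base ((mem_cellsOf h w x).mp hxc) hpred.2 hpred.1⟩
    · intro x hx
      obtain ⟨hxc, hpred⟩ := List.mem_filter.mp hx
      rw [Bool.and_eq_true] at hpred
      refine ⟨hxc, hpred.1, fun hcon => ?_⟩
      have h2 := hpred.2
      have h3 := (List.mem_filter.mp hcon).2
      rw [Bool.and_eq_true] at h3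
      simp [h3.2] at h2
    · intro x hxc hxz
      by_cases hb : isBorder h w x = true
      · exact Or.inl (List.mem_filter.mpr ⟨hxc, by simp [hxz, hb]⟩)
      · exact Or.inr (List.mem_filter.mpr ⟨hxc, by simp [hxz, hb]⟩)
    · intro x hxc hxb hxz
      exact List.mem_filter.mpr ⟨hxc, by simp [hxz, hxb]⟩
  cases hx : ((cellsOf h w).any (fun p => zeroAt g p.1 p.2 && decide (p ∈ dfsLoop g h w
        ((cellsOf h w).filter (fun p => !(isBorder h w p && zeroAt g p.1 p.2)))
        (((cellsOf h w).filter (fun p => isBorder h w p && zeroAt g p.1 p.2)).reverse)))) with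
  | false =>
    cases hy : satLoop ((cellsOf h w).filter (fun p => zeroAt g p.1 p.2 && isBorder h w p))
        ((cellsOf h w).filter (fun p => zeroAt g p.1 p.2 && !isBorder h w p)) with
    | false => rfl
    | true =>
      exfalso
      rw [hx] at hA; rw [hy] at hB
      exact absurd (hB.mp rfl) (by simpa using hA)
  | true =>
    cases hy : satLoop ((cellsOf h w).filter (fun p => zeroAt g p.1 p.2 && isBorder h w p))
        ((cellsOf h w).filter (fun p => zeroAt g p.1 p.2 && !isBorder h w p)) with
    | true => rfl
    | false =>
      exfalso
      rw [hx] at hA; rw [hy] at hB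
      exact absurd (hA.mp rfl) (by simpa using hB)

-- ===== VERDICT (by name: the statement is the Claim_ definition above) =====
theorem has_hole_py_spec : Claim_equal_has_hole_py := by
  intro shape _ _
  unfold Spec_has_hole_py has_hole_py has_hole_py_alt
  rcases heq : (PySem.Dict.mk shape).get? "subgrid" with _ | g
  · rfl
  · simp only
    by_cases hsz : ((g.length : Int) ≤ 2 ∨
        (if (0 : Int) < (g.length : Int) then ((g.headD []).length : Int) else 0) ≤ 2)
    · simp only [if_pos hsz]
    · simp only [if_neg hsz]
      exact core_equal g (g.length : Int)
        (if (0 : Int) < (g.length : Int) then ((g.headD []).length : Int) else 0)
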